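-- pv_equiv track=rewrite | github.com/lucas-cavalcanti-ads/projetos-fiap | 1ANO/PYTHON/ListaExercicios/Lista09/domino.py | jogadaCpu
-- ===== SOURCE A (Python) =====
-- def jogadaCpu(mao, domino, esquerda, direita):
--     i = 0
--     while i < len(mao):
--         pedra = mao[i]
--         if pedra[0] == esquerda or pedra[1] == esquerda:
--             return mao.pop(i)
--         if pedra[0] == direita or pedra[1] == direita:
--             return mao.pop(i)
--         i = i + 1
--         if i == len(mao):
--             mao.append(domino.pop())
-- ===== SOURCE B (Python) =====
-- def jogadaCpu(mao, domino, esquerda, direita):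
--     # Return-value equivalence with A; applies A's net mutation of mao/domino
--     # in one bulk splice at the end instead of mutating while searching.
--     if not mao:
--         return None
--     ends = {esquerda, direita}
--     pool = mao + domino[::-1]                 # the order pieces get examined
--     k = next(i for i, p in enumerate(pool) if ends & set(p[:2]))
--     pedra = pool[k]
--     if k < len(mao):
--         del mao[k]                            # played from the original hand
--     else:
--         drawn = k - len(mao)                  # non-matching draws kept in hand
--         mao += pool[len(mao):k]
--         del domino[len(domino) - drawn - 1:]
--     return pedra
-- ===== Notes on version B (the rewrite author's own statement) =====
-- stated objective: alternative
-- what changed: A is a stateful index-walking while-loop that mutates the hand as it scans (drawing into the hand and re-testing via the moving index); B instead materializes the whole examination order as one immutable list mao + domino[::-1], locates the first piece hitting either end with a single generator/set-intersection search, and then applies A's net mutation in one bulk splice.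
-- outside the precondition, e.g. on jogadaCpu([], [[1, 1]], 1, 1): A returns None, B returns None; on jogadaCpu([[9, 9]], [], 1, 5): A raises IndexError, B raises StopIteration; on jogadaCpu([[5]], [], 1, 5): A raises IndexError, B returns [5]
import Mathlib
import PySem

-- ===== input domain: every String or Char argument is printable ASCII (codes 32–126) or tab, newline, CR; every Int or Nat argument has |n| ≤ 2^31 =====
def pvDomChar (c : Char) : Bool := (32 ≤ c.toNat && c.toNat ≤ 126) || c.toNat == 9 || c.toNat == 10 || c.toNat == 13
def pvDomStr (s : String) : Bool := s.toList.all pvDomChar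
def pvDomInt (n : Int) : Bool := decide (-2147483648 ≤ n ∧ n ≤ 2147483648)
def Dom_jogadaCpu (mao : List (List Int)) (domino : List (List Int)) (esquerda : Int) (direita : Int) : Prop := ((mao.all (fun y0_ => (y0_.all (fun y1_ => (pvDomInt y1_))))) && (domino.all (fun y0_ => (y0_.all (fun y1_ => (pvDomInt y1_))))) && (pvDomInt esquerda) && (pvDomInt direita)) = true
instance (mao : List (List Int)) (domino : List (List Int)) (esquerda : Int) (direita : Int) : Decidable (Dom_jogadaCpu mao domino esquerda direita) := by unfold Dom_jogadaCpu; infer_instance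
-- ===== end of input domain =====

-- B replaces A's stateful index-walking while-loop (which mutates the hand it is scanning) by one
-- immutable examination list mao ++ domino[::-1], a single index search over it, and a bulk splice;
-- equivalence is about the RETURN value (B's Python performs A's net mutation of mao/domino in bulk).

-- ===== PORT A =====
-- literal port of A's while-loop: state (mao, domino, i); junk [] is returned only on paths where
-- the Python raises (pedra[0]/pedra[1] on a short piece, domino.pop() on empty) or returns None
-- (mao = [] at entry) — all excluded by Pre_.
def jogadaCpuLoopA (mao : List (List Int)) (domino : List (List Int)) (esquerda : Int) (direita : Int) (i : Nat) : List Int :=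
  if h : i < mao.length then
    match PySem.List.pyGet? mao[i] 0 with
    | none => []                                       -- IndexError: pedra[0]
    | some a =>
      if a = esquerda then mao[i]                      -- return mao.pop(i): value mao[i]
      else
        match PySem.List.pyGet? mao[i] 1 with
        | none => []                                   -- IndexError: pedra[1]
        | some b =>
          if b = esquerda then mao[i]                  -- return mao.pop(i): value mao[i]
          else if a = direita ∨ b = direita then mao[i]   -- return mao.pop(i): value mao[i]
          else if i + 1 = mao.length then
            match hpop : PySem.List.pop? domino with
            | some pd => jogadaCpuLoopA (mao ++ [pd.1]) pd.2 esquerda direita (i + 1)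
            | none => []                               -- IndexError: pop from empty list
          else jogadaCpuLoopA mao domino esquerda direita (i + 1)
  else []                                              -- while-loop exits: Python returns None
termination_by (domino.length, mao.length - i)
decreasing_by
  · have := PySem.List.length_of_pop?_eq_some _ hpop
    exact Prod.Lex.left _ _ (by omega)
  · exact Prod.Lex.right _ (by omega)

def jogadaCpu (mao : List (List Int)) (domino : List (List Int)) (esquerda : Int) (direita : Int) : List Int :=
  jogadaCpuLoopA mao domino esquerda direita 0

-- ===== PORT B =====
-- the generator search: next(i for i, p in enumerate(pool) if ends & set(p[:2]))
def jogadaCpuFindIdx (pool : List (List Int)) (esquerda : Int) (direita : Int) (i : Nat) : Option Nat :=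
  match pool with
  | [] => none                                         -- generator exhausted: StopIteration
  | p :: rest =>
    if (PySem.List.slice p none (some 2)).any (fun x => x == esquerda || x == direita) then some i
    else jogadaCpuFindIdx rest esquerda direita (i + 1)

def jogadaCpu_alt (mao : List (List Int)) (domino : List (List Int)) (esquerda : Int) (direita : Int) : List Int :=
  if mao = [] then []                                  -- Python B returns None here (excluded by Pre_)
  else
    let pool := mao ++ ((PySem.List.slice? domino none none (-1)).getD [])   -- mao + domino[::-1]
    match jogadaCpuFindIdx pool esquerda direita 0 with
    | some k => (PySem.List.pyGet? pool (k : Int)).getD []   -- pedra = pool[k]; k in range by construction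
    | none => []                                       -- StopIteration: no match (excluded by Pre_)

-- ===== PRECONDITION & SPEC =====
-- Pre_ excludes: mao = [] (A returns None, not a list); any piece with fewer than two values —
-- the natural domino domain; A happens to still return when such a piece matches on its first
-- value, and raises IndexError otherwise; and inputs with no matching piece at all (A raises
-- IndexError from domino.pop() on the exhausted pile, B raises StopIteration).
def Pre_jogadaCpu (mao : List (List Int)) (domino : List (List Int)) (esquerda : Int) (direita : Int) : Prop :=
  mao ≠ [] ∧ (∀ p ∈ mao, 2 ≤ p.length) ∧ (∀ p ∈ domino, 2 ≤ p.length) ∧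
  ∃ p ∈ mao ++ domino, ∃ x ∈ p.take 2, x = esquerda ∨ x = direita

instance (mao : List (List Int)) (domino : List (List Int)) (esquerda : Int) (direita : Int) : Decidable (Pre_jogadaCpu mao domino esquerda direita) := by unfold Pre_jogadaCpu; infer_instance

def pvWitness_jogadaCpu : List (List Int) × List (List Int) × Int × Int := ([[1, 2]], [], 1, 5)

def Spec_jogadaCpu (mao : List (List Int)) (domino : List (List Int)) (esquerda : Int) (direita : Int) (out : List Int) : Prop := out = jogadaCpu_alt mao domino esquerda direita
instance (mao : List (List Int)) (domino : List (List Int)) (esquerda : Int) (direita : Int) (out : List Int) : Decidable (Spec_jogadaCpu mao domino esquerda direita out) := by unfold Spec_jogadaCpu; infer_instance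

-- ===== CLAIM (what is proved, stated in full; the proofs are below) =====
def Claim_equal_jogadaCpu : Prop := ∀ (mao : List (List Int)) (domino : List (List Int)) (esquerda : Int) (direita : Int), Dom_jogadaCpu mao domino esquerda direita → Pre_jogadaCpu mao domino esquerda direita → Spec_jogadaCpu mao domino esquerda direita (jogadaCpu mao domino esquerda direita)

-- ===== LEMMAS AND PROOFS =====

lemma pop?_some_eq {α : Type} {xs : List α} {r : α × List α}
    (h : PySem.List.pop? xs = some r) : xs = r.2 ++ [r.1] := by
  rcases xs.eq_nil_or_concat with rfl | ⟨ys, x, rfl⟩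
  · simp [PySem.List.pop?, PySem.List.pyIdx?] at h
  · rw [List.concat_eq_append, PySem.List.pop?_last] at h
    rw [List.concat_eq_append]
    cases h
    rfl

lemma pop?_none_eq {α : Type} {xs : List α}
    (h : PySem.List.pop? xs = none) : xs = [] := by
  rcases xs.eq_nil_or_concat with rfl | ⟨ys, x, rfl⟩
  · rfl
  · rw [List.concat_eq_append, PySem.List.pop?_last] at h
    cases h

-- proof-side view of B's search: the first piece of pool hitting either end (as a value)
def firstHit (pool : List (List Int)) (esquerda : Int) (direita : Int) : Option (List Int) :=
  match pool with
  | [] => none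
  | p :: rest =>
    if (p.take 2).any (fun x => x == esquerda || x == direita) then some p
    else firstHit rest esquerda direita

lemma findIdx_shift (esquerda direita : Int) :
    ∀ (pool : List (List Int)) (i : Nat),
    jogadaCpuFindIdx pool esquerda direita i =
      (jogadaCpuFindIdx pool esquerda direita 0).map (· + i) := by
  intro pool
  induction pool with
  | nil => intro i; simp [jogadaCpuFindIdx]
  | cons p rest ih =>
    intro i
    simp only [jogadaCpuFindIdx]
    split
    · simp
    · rw [ih (i + 1), ih 1]
      cases jogadaCpuFindIdx rest esquerda direita 0 <;> simp <;> omega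

lemma firstHit_cons (p : List Int) (rest : List (List Int)) (e d : Int) :
    firstHit (p :: rest) e d =
      if (p.take 2).any (fun x => x == e || x == d) then some p else firstHit rest e d := rfl

lemma take_two_eq {p : List Int} {a b : Int} (h2 : 2 ≤ p.length)
    (h0 : PySem.List.pyGet? p 0 = some a) (h1 : PySem.List.pyGet? p 1 = some b) :
    p.take 2 = [a, b] := by
  match p, h2 with
  | x :: y :: t, _ =>
    have e0 : PySem.List.pyGet? (x :: y :: t) 0 = some x := by
      rw [PySem.List.pyGet?_zero]; rfl
    have e1 : PySem.List.pyGet? (x :: y :: t) 1 = some y := by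
      rw [show (1 : Int) = ((1 : Nat) : Int) from rfl, PySem.List.pyGet?_natCast]; rfl
    rw [e0] at h0
    rw [e1] at h1
    simp_all

-- B's index search followed by pool[k] computes firstHit
lemma alt_eq_firstHit (esquerda direita : Int) :
    ∀ (pool : List (List Int)),
    (match jogadaCpuFindIdx pool esquerda direita 0 with
     | some k => (PySem.List.pyGet? pool (k : Int)).getD []
     | none => ([] : List Int)) = (firstHit pool esquerda direita).getD [] := by
  intro pool
  induction pool with
  | nil => simp [jogadaCpuFindIdx, firstHit]
  | cons p rest ih =>
    have hs : PySem.List.slice p none (some 2) = p.take 2 := by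
      have := PySem.List.slice_to p (b := 2) (by norm_num)
      simpa using this
    by_cases hc : ((p.take 2).any fun x => x == esquerda || x == direita) = true
    · rw [firstHit_cons, if_pos hc]
      simp only [jogadaCpuFindIdx, hs, if_pos hc]
      simp
    · rw [firstHit_cons, if_neg hc]
      simp only [jogadaCpuFindIdx, hs, if_neg hc]
      rw [findIdx_shift esquerda direita rest 1]
      cases hfi : jogadaCpuFindIdx rest esquerda direita 0 with
      | none => rw [hfi] at ih; simpa using ih
      | some k =>
        rw [hfi] at ih
        simp only [Option.map_some]
        have hg : PySem.List.pyGet? (p :: rest) ((k + 1 : Nat) : Int) = PySem.List.pyGet? rest (k : Int) := by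
          simp [PySem.List.pyGet?_natCast]
        rw [hg]
        simpa using ih

-- the main invariant: from index i, A's loop computes firstHit over the remaining examination order
lemma loopA_eq (esquerda direita : Int) :
    ∀ (domino mao : List (List Int)) (i : Nat), i < mao.length →
    (∀ p ∈ mao, 2 ≤ p.length) → (∀ p ∈ domino, 2 ≤ p.length) →
    jogadaCpuLoopA mao domino esquerda direita i =
      (firstHit (mao.drop i ++ domino.reverse) esquerda direita).getD [] := by
  intro domino mao i
  fun_induction jogadaCpuLoopA mao domino esquerda direita i with
  | case1 mao domino i h hg0 =>
    intro _ hmao _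
    exfalso
    have h2 : 2 ≤ mao[i].length := hmao _ (mao.getElem_mem h)
    rw [PySem.List.pyGet?_eq_some_getElem _ (by omega) (by simp; omega)] at hg0
    cases hg0
  | case2 mao domino i h hg0 =>
    intro _ hmao _
    have h2 : 2 ≤ mao[i].length := hmao _ (mao.getElem_mem h)
    have hg1 : PySem.List.pyGet? mao[i] 1 = some (mao[i]'h)[1] :=
      PySem.List.pyGet?_eq_some_getElem _ (by omega) (by simp; omega)
    have ht := take_two_eq h2 hg0 hg1
    rw [List.drop_eq_getElem_cons h]
    have hpa : (((mao[i] : List Int).take 2).any fun x => x == esquerda || x == direita) = true := by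
      rw [ht]; simp
    rw [List.cons_append, firstHit_cons, if_pos hpa]
    rfl
  | case3 mao domino i h a hg0 hc hg1 =>
    intro _ hmao _
    exfalso
    have h2 : 2 ≤ mao[i].length := hmao _ (mao.getElem_mem h)
    rw [PySem.List.pyGet?_eq_some_getElem _ (by omega) (by simp; omega)] at hg1
    cases hg1
  | case4 mao domino i h a hg0 hc1 hg1 =>
    intro _ hmao _
    have h2 : 2 ≤ mao[i].length := hmao _ (mao.getElem_mem h)
    have ht := take_two_eq h2 hg0 hg1
    rw [List.drop_eq_getElem_cons h]
    have hpa : (((mao[i] : List Int).take 2).any fun x => x == esquerda || x == direita) = true := by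
      rw [ht]; simp
    rw [List.cons_append, firstHit_cons, if_pos hpa]
    rfl
  | case5 mao domino i h a hg0 hc1 b hg1 hc2 hc =>
    intro _ hmao _
    have h2 : 2 ≤ mao[i].length := hmao _ (mao.getElem_mem h)
    have ht := take_two_eq h2 hg0 hg1
    rw [List.drop_eq_getElem_cons h]
    have hpa : (((mao[i] : List Int).take 2).any fun x => x == esquerda || x == direita) = true := by
      rw [ht]; simp; tauto
    rw [List.cons_append, firstHit_cons, if_pos hpa]
    rfl
  | case6 mao domino i h a hg0 hc1 b hg1 hc2 hc3 hlen pd hpop ih =>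
    intro _ hmao hdom
    have h2 : 2 ≤ mao[i].length := hmao _ (mao.getElem_mem h)
    have hxs := pop?_some_eq hpop
    have hmem : pd.1 ∈ domino := by rw [hxs]; simp
    have hrest : ∀ p ∈ pd.2, 2 ≤ p.length := by
      intro p hp; exact hdom p (by rw [hxs]; simp [hp])
    have ih' := ih (by simp; omega)
      (by intro p hp; rw [List.mem_append] at hp
          rcases hp with hp | hp
          · exact hmao p hp
          · simp at hp; rw [hp]; exact hdom _ hmem)
      hrest
    rw [ih']
    have hdrop : (mao ++ [pd.1]).drop (i + 1) = [pd.1] := by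
      rw [hlen, List.drop_append_of_le_length (le_refl _)]
      simp
    rw [hdrop]
    have hdropi : mao.drop i = [mao[i]] := by
      rw [List.drop_eq_getElem_cons h]
      have : mao.drop (i + 1) = [] := by
        apply List.drop_eq_nil_of_le; omega
      rw [this]
    rw [hdropi, hxs]
    have ht := take_two_eq h2 hg0 hg1
    have hna : ¬ ((((mao[i] : List Int).take 2).any fun x => x == esquerda || x == direita) = true) := by
      rw [ht]; simp; tauto
    rw [List.reverse_append, List.reverse_singleton, List.singleton_append, List.cons_append]
    simp only [List.nil_append]
    rw [firstHit_cons (mao[i]) (pd.1 :: pd.2.reverse) esquerda direita, if_neg hna]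
  | case7 mao domino i h a hg0 hc1 b hg1 hc2 hc3 hlen hpop =>
    intro _ hmao _
    have h2 : 2 ≤ mao[i].length := hmao _ (mao.getElem_mem h)
    have hnil : domino = [] := pop?_none_eq hpop
    subst hnil
    have hdropi : mao.drop i = [mao[i]] := by
      rw [List.drop_eq_getElem_cons h]
      have : mao.drop (i + 1) = [] := by
        apply List.drop_eq_nil_of_le; omega
      rw [this]
    rw [hdropi]
    have ht := take_two_eq h2 hg0 hg1
    have hna : ¬ ((((mao[i] : List Int).take 2).any fun x => x == esquerda || x == direita) = true) := by
      rw [ht]; simp; tauto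
    rw [List.reverse_nil, List.append_nil, firstHit_cons, if_neg hna]
    rfl
  | case8 mao domino i h a hg0 hc1 b hg1 hc2 hc3 hlen ih =>
    intro _ hmao hdom
    have h2 : 2 ≤ mao[i].length := hmao _ (mao.getElem_mem h)
    have hlt : i + 1 < mao.length := by omega
    rw [ih hlt hmao hdom]
    rw [List.drop_eq_getElem_cons h]
    have ht := take_two_eq h2 hg0 hg1
    have hna : ¬ ((((mao[i] : List Int).take 2).any fun x => x == esquerda || x == direita) = true) := by
      rw [ht]; simp; tauto
    rw [List.cons_append, firstHit_cons, if_neg hna]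
  | case9 mao domino i h =>
    intro hi _ _
    exact absurd hi h

-- ===== VERDICT (by name: the statement is the Claim_ definition above) =====
theorem jogadaCpu_spec : Claim_equal_jogadaCpu := by
  intro mao domino esquerda direita _ hpre
  obtain ⟨hne, hmao, hdom, _⟩ := hpre
  show jogadaCpu mao domino esquerda direita = jogadaCpu_alt mao domino esquerda direita
  have h0 : 0 < mao.length := List.length_pos_iff.mpr hne
  rw [jogadaCpu, loopA_eq esquerda direita domino mao 0 h0 hmao hdom]
  rw [jogadaCpu_alt, if_neg hne]
  simp only [PySem.List.slice?_none_none_neg_one, Option.getD_some]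
  rw [alt_eq_firstHit esquerda direita (mao ++ domino.reverse), List.drop_zero]
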